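-- pv_equiv track=rewrite | github.com/jaegyeongkim/Today-I-Learn | 알고리즘 문제풀이/프로그래머스/Level 1/문자열 내 마음대로 정렬하기.py | solution
-- ===== SOURCE A (Python) =====
-- def solution(strings, n):
--     answer = []
--     strings_dic = {x: 0 for x in strings}
--
--     for i in range(len(strings)):
--         strings_dic[strings[i]] = ord(strings[i][n])
--     strings_dic = sorted(strings_dic.items(),
--                          key=lambda item: item[1])  # value: [1]
--
--     n = 0
--     while n < len(strings):
--         key, value = strings_dic[n][0], strings_dic[n][1]
--         cnt = 0
--         compare = [key]
--         for i in range(n+1, len(strings)):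
--             if strings_dic[i][1] == value:
--                 cnt += 1
--                 compare.append(strings_dic[i][0])
--             else:
--                 break
--
--         compare = sorted(compare)
--         for com in compare:
--             answer.append(com)
--
--         if cnt > 0:
--             n += cnt
--         n += 1
--     return answer
-- ===== SOURCE B (Python) =====
-- def solution(strings, n):
--     return sorted(dict.fromkeys(strings), key=lambda x: (x[n], x))
-- ===== Notes on version B (the rewrite author's own statement) =====
-- stated objective: simpler
-- what changed: Replaces A's three-step pipeline (ord-value dict, sort by value, then a while-loop that gathers equal-value runs and re-sorts each run) with one dict.fromkeys dedup followed by a single sorted() call on the composite key (x[n], x).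
-- crash fix: On lists containing a duplicate string A always raises IndexError (its while-loop runs to len(strings) but indexes the deduplicated item list); B returns the deduplicated strings sorted by (x[n], x). — e.g. on solution(["ab", "ab"], 0): A raises IndexError, B returns ["ab"]
import Mathlib
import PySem

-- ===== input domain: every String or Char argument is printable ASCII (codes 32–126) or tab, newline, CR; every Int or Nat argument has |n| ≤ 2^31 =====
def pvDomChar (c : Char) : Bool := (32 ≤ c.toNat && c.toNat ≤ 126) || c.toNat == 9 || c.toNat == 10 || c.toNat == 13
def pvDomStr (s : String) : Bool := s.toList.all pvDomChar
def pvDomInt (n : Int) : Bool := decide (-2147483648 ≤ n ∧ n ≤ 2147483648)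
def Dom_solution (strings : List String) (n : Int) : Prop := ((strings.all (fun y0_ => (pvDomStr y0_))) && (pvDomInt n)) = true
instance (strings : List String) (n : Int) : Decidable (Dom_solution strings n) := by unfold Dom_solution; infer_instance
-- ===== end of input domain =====

-- B replaces A's pipeline (ord-value dict, sort by value, while-loop regrouping equal-value runs and re-sorting each)
-- with a dict.fromkeys dedup and ONE sort on the composite key (x[n], x): simpler, same result.


-- ===== PORT A =====
-- ord(s[n]); Python raises IndexError where pyGet? is none — those inputs are excluded by Pre_solution
def ordAt (s : String) (n : Int) : Int :=
  match PySem.Str.pyGet? s n with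
  | some c => (c.toNat : Int)
  | none => 0

-- the inner 'for i in range(n+1, len(strings)): … else: break' loop: returns (cnt, appended keys);
-- 'strings_dic[i]' with i out of range raises IndexError in Python (outside Pre_solution) — we stop there
def innerA (items : List (String × Int)) (total : Nat) (i : Nat) (v : Int) : Nat × List String :=
  if _h : i < total then
    match items[i]? with
    | some p =>
      if p.2 = v then
        let r := innerA items total (i + 1) v
        (r.1 + 1, p.1 :: r.2)
      else (0, [])
    | none => (0, [])
  else (0, [])
termination_by total - i
decreasing_by omega

-- the 'while n < len(strings)' loop; 'strings_dic[n]' out of range raises IndexError (outside Pre_solution)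
def outerA (items : List (String × Int)) (total : Nat) (idx : Nat) (answer : List String) : List String :=
  if _h : idx < total then
    match items[idx]? with
    | some p =>
      let r := innerA items total (idx + 1) p.2
      let compare := PySem.List.sorted (p.1 :: r.2) (fun x => x)
      outerA items total (idx + r.1 + 1) (answer ++ compare)
    | none => answer
  else answer
termination_by total - idx
decreasing_by omega

def solution (strings : List String) (n : Int) : List String :=
  let dic0 : PySem.Dict String Int := strings.foldl (fun d x => d.insert x 0) PySem.Dict.empty
  let dic : PySem.Dict String Int := strings.foldl (fun d x => d.insert x (ordAt x n)) dic0
  let sdic := PySem.List.sorted dic.items (fun p => p.2)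
  outerA sdic strings.length 0 []

-- ===== PORT B =====
-- x[n] as a Char; Pre_solution guarantees the index is in range, so the default is never used
def chAt (s : String) (n : Int) : Char := (PySem.Str.pyGet? s n).getD ' '

def solution_alt (strings : List String) (n : Int) : List String :=
  PySem.List.sorted2 (PySem.List.dedup strings) (fun x => chAt x n) (fun x => x)

-- ===== PRECONDITION & SPEC =====
-- Pre_ excludes exactly the inputs where A raises IndexError: a duplicated string (A's while-loop runs to
-- len(strings) but indexes the deduplicated item list) or an index n out of range for some listed string.
def Pre_solution (strings : List String) (n : Int) : Prop :=
  strings.Nodup ∧ ∀ s ∈ strings, (PySem.Str.pyGet? s n).isSome = true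
instance (strings : List String) (n : Int) : Decidable (Pre_solution strings n) := by
  unfold Pre_solution; infer_instance

def pvWitness_solution : List String × Int := (["sun", "bed", "car"], 1)

-- On lists containing a duplicate string (with n in range for every listed string) A always raises
-- IndexError; B returns the deduplicated strings sorted by (x[n], x).
def Raises_solution (strings : List String) (n : Int) : Prop :=
  (¬ strings.Nodup) ∧ ∀ s ∈ strings, (PySem.Str.pyGet? s n).isSome = true
instance (strings : List String) (n : Int) : Decidable (Raises_solution strings n) := by
  unfold Raises_solution; infer_instance

def pvRaiseWitness_solution : List String × Int := (["ab", "ab"], 0)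
def pvRaiseWitnessOut_solution : List String := ["ab"]

def Spec_solution (strings : List String) (n : Int) (out : List String) : Prop := out = solution_alt strings n
instance (strings : List String) (n : Int) (out : List String) : Decidable (Spec_solution strings n out) := by unfold Spec_solution; infer_instance

-- ===== CLAIM (what is proved, stated in full; the proofs are below) =====
def Claim_equal_solution : Prop := ∀ (strings : List String) (n : Int), Dom_solution strings n → Pre_solution strings n → Spec_solution strings n (solution strings n)

def Claim_raises_solution : Prop := (∀ (strings : List String) (n : Int), Dom_solution strings n → Raises_solution strings n → ¬ Pre_solution strings n) ∧ (Dom_solution (pvRaiseWitness_solution.1) (pvRaiseWitness_solution.2) ∧ Raises_solution (pvRaiseWitness_solution.1) (pvRaiseWitness_solution.2) ∧ solution_alt (pvRaiseWitness_solution.1) (pvRaiseWitness_solution.2) = pvRaiseWitnessOut_solution)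

-- ===== LEMMAS AND PROOFS =====

-- the composite key (x[n], x), ordered lexicographically
def pvKey (n : Int) (x : String) : Char ×ₗ String := toLex (chAt x n, x)

theorem char_eq_of_toNat_eq {a b : Char} (h : a.toNat = b.toNat) : a = b :=
  Char.ext (UInt32.toNat_inj.mp h)

theorem char_lt_of_toNat_lt {a b : Char} (h : a.toNat < b.toNat) : a < b := by
  simp only [Char.lt_def]
  exact UInt32.lt_iff_toNat_lt.mpr h

-- B's one sorted2 call IS a single-key sort under the lexicographic composite key
theorem sorted2_eq_sorted_key (xs : List String) (n : Int) :
    PySem.List.sorted2 xs (fun x => chAt x n) (fun x => x) = PySem.List.sorted xs (pvKey n) := by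
  have hbefore : ∀ a b : String,
      (decide (chAt a n < chAt b n) || (!decide (chAt b n < chAt a n) && decide (a < b)))
        = decide (pvKey n a < pvKey n b) := by
    intro a b
    by_cases h1 : chAt a n < chAt b n
    · have hk : pvKey n a < pvKey n b := Prod.Lex.lt_iff.mpr (Or.inl h1)
      simp [h1, hk]
    · by_cases h2 : chAt b n < chAt a n
      · have hk : ¬ pvKey n a < pvKey n b := by
          intro hlt
          rcases Prod.Lex.lt_iff.mp hlt with hc | ⟨hc, _⟩
          · exact h1 hc
          · exact (ne_of_lt h2) hc.symm
        simp [h1, h2, hk]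
      · have he : chAt a n = chAt b n := le_antisymm (not_lt.mp h2) (not_lt.mp h1)
        by_cases h3 : a < b
        · have hk : pvKey n a < pvKey n b := Prod.Lex.lt_iff.mpr (Or.inr ⟨he, h3⟩)
          simp [h1, h2, h3, hk]
        · have hk : ¬ pvKey n a < pvKey n b := by
            intro hlt
            rcases Prod.Lex.lt_iff.mp hlt with hc | ⟨_, hs⟩
            · exact h1 hc
            · exact h3 hs
          simp [h1, h2, h3, hk]
  rw [PySem.List.sorted_eq_foldl_insertBy]
  show List.foldl (fun acc x => PySem.List.insertBy
      (fun a b => decide (chAt a n < chAt b n) || (!decide (chAt b n < chAt a n) && decide (a < b))) x acc) [] xs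
    = _
  simp only [hbefore]

-- dict.fromkeys of a duplicate-free list is the list itself
theorem foldl_add_of_nodup : ∀ (l : List String) (s : List String),
    (s ++ l).Nodup → l.foldl PySem.Set.add s = s ++ l := by
  intro l
  induction l with
  | nil => intro s _; simp
  | cons x t ih =>
    intro s h
    have hx : x ∉ s := by
      rw [List.nodup_append] at h
      exact fun hm => h.2.2 x hm x (by simp) rfl
    rw [List.foldl_cons, PySem.Set.add_of_not_mem hx,
      ih (s ++ [x]) (by rw [List.append_assoc]; exact h)]
    simp

theorem dedup_of_nodup (l : List String) (h : l.Nodup) : PySem.List.dedup l = l := by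
  have := foldl_add_of_nodup l [] (by simpa using h)
  simpa [PySem.List.dedup_eq_ofList, PySem.Set.ofList_eq_foldl] using this

-- overwriting every key of an already-built dict, in key order, rewrites the values in place
theorem items_overwrite (f : String → Int) :
    ∀ (l : List String) (d : PySem.Dict String Int) (pre : List (String × Int)) (g : String → Int),
    l.Nodup → (∀ p ∈ pre, p.1 ∉ l) →
    d.items = pre ++ l.map (fun x => (x, g x)) →
    (l.foldl (fun d x => d.insert x (f x)) d).items = pre ++ l.map (fun x => (x, f x)) := by
  intro l
  induction l with
  | nil => intro d pre g _ _ hd; simpa using hd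
  | cons x t ih =>
    intro d pre g hnd hpre hd
    have hx : d.contains x = true := by
      rw [PySem.Dict.contains_iff_mem_keys]
      have : x ∈ d.items.map (·.1) := by rw [hd]; simp
      simpa [PySem.Dict.keys] using this
    have hxt : x ∉ t := (List.nodup_cons.mp hnd).1
    have hitems : (d.insert x (f x)).items = (pre ++ [(x, f x)]) ++ t.map (fun y => (y, g y)) := by
      rw [PySem.Dict.items_insert_of_contains d (f x) hx, hd]
      simp only [List.map_append, List.map_cons, List.map_map]
      have h1 : pre.map (fun p => if (p.1 == x) = true then (x, f x) else p) = pre := by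
        conv_rhs => rw [← List.map_id pre]
        apply List.map_congr_left
        intro p hp
        have hne : p.1 ≠ x := fun hh => (hpre p hp) (hh ▸ List.mem_cons_self)
        simp [hne]
      have h2 : t.map ((fun p => if (p.1 == x) = true then (x, f x) else p) ∘ (fun y => (y, g y)))
          = t.map (fun y => (y, g y)) := by
        apply List.map_congr_left
        intro y hy
        have hne : y ≠ x := fun hh => hxt (hh ▸ hy)
        simp [Function.comp, hne]
      rw [h1, h2]
      simp
    rw [List.foldl_cons,
      ih (d.insert x (f x)) (pre ++ [(x, f x)]) g (List.nodup_cons.mp hnd).2 ?_ hitems]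
    · simp
    · intro p hp
      rcases List.mem_append.mp hp with hmem | hmem
      · exact fun hm => (hpre p hmem) (List.mem_cons_of_mem _ hm)
      · simp at hmem
        intro hm
        rw [hmem] at hm
        simp at hm
        exact hxt hm

-- the items of A's dict, for duplicate-free strings
theorem dic_items (strings : List String) (n : Int) (hnd : strings.Nodup) :
    (strings.foldl (fun d x => d.insert x (ordAt x n))
      (strings.foldl (fun d x => d.insert x 0) PySem.Dict.empty)).items
    = strings.map (fun x => (x, ordAt x n)) := by
  have h0 : (strings.foldl (fun d x => d.insert x 0) PySem.Dict.empty).items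
      = strings.map (fun x => (x, (0 : Int))) := by
    have := PySem.Dict.items_foldl_insert_fresh strings (fun x => x) (fun _ => (0 : Int))
      PySem.Dict.empty (fun a _ => PySem.Dict.contains_empty a) (by simpa using hnd)
    simpa using this
  exact items_overwrite (fun x => ordAt x n) strings _ [] (fun _ => (0 : Int)) hnd
    (by simp) (by simpa using h0)

theorem ordAt_eq (s : String) (n : Int) (h : (PySem.Str.pyGet? s n).isSome = true) :
    ordAt s n = ((chAt s n).toNat : Int) := by
  unfold ordAt chAt
  cases hq : PySem.Str.pyGet? s n with
  | none => rw [hq] at h; simp at h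
  | some c => simp

-- the head of a dropWhile fails the predicate
theorem dropWhile_head_false {α : Type} (pr : α → Bool) :
    ∀ (l : List α) (q : α) (rest : List α), l.dropWhile pr = q :: rest → pr q = false := by
  intro l
  induction l with
  | nil => intro q rest h; simp at h
  | cons x t ih =>
    intro q rest h
    by_cases hx : pr x = true
    · rw [List.dropWhile_cons, if_pos hx] at h
      exact ih q rest h
    · rw [List.dropWhile_cons, if_neg hx] at h
      cases h
      simpa using hx

-- the inner loop takes the maximal run of value v starting at index i (total = items.length)
theorem inner_spec (items : List (String × Int)) (v : Int) :
    ∀ (k i : Nat), items.length - i ≤ k →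
    innerA items items.length i v =
      (((items.drop i).takeWhile (fun p => p.2 == v)).length,
       ((items.drop i).takeWhile (fun p => p.2 == v)).map (·.1)) := by
  intro k
  induction k with
  | zero =>
    intro i hk
    have h : ¬ i < items.length := by omega
    have hnil : items.drop i = [] := List.drop_eq_nil_of_le (by omega)
    rw [innerA]
    simp [h, hnil]
  | succ k ih =>
    intro i hk
    by_cases h : i < items.length
    · have hdrop : items.drop i = items[i] :: items.drop (i + 1) :=
        List.drop_eq_getElem_cons h
      rw [innerA]
      simp only [h, dif_pos, List.getElem?_eq_getElem h]
      by_cases hv : items[i].2 = v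
      · have hbe : ((items[i].2 == v) = true) := by simp [hv]
        rw [if_pos hv, ih (i + 1) (by omega), hdrop, List.takeWhile_cons, hbe]
        simp
      · have hbe : ((items[i].2 == v) = false) := by simp [hv]
        rw [if_neg hv, hdrop, List.takeWhile_cons, hbe]
        simp
    · have hnil : items.drop i = [] := List.drop_eq_nil_of_le (by omega)
      rw [innerA]
      simp [h, hnil]

-- main invariant of the while-loop: it emits a permutation of the remaining keys,
-- strictly increasing under the composite key
theorem outer_spec (n : Int) :
    ∀ (k : Nat) (items : List (String × Int)) (idx : Nat) (answer : List String),
    items.length - idx ≤ k →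
    items.Pairwise (fun a b => a.2 ≤ b.2) →
    (∀ p ∈ items, p.2 = ((chAt p.1 n).toNat : Int)) →
    (items.map (·.1)).Nodup →
    ∃ r, outerA items items.length idx answer = answer ++ r ∧
      r.Perm ((items.drop idx).map (·.1)) ∧
      r.Pairwise (fun a b => pvKey n a < pvKey n b) := by
  intro k
  induction k with
  | zero =>
    intro items idx answer hk _ _ _
    have h : ¬ idx < items.length := by omega
    have hnil : items.drop idx = [] := List.drop_eq_nil_of_le (by omega)
    refine ⟨[], ?_, ?_, ?_⟩
    · rw [outerA]; simp [h]
    · simp [hnil]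
    · simp
  | succ k ih =>
    intro items idx answer hk hpw hvals hnd
    by_cases h : idx < items.length
    · set p := items[idx] with hp
      have hidx : items[idx]? = some p := List.getElem?_eq_getElem h
      set tw := (items.drop (idx + 1)).takeWhile (fun q => q.2 == p.2) with htw
      set dw := (items.drop (idx + 1)).dropWhile (fun q => q.2 == p.2) with hdw
      have hinner : innerA items items.length (idx + 1) p.2 = (tw.length, tw.map (·.1)) := by
        rw [htw]; exact inner_spec items p.2 items.length (idx + 1) (by omega)
      have hdropidx : items.drop idx = p :: items.drop (idx + 1) := List.drop_eq_getElem_cons h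
      have hsplit : items.drop (idx + 1) = tw ++ dw := by
        rw [htw, hdw, List.takeWhile_append_dropWhile]
      have h1 : (items.drop (idx + 1)).drop tw.length = items.drop (idx + tw.length + 1) := by
        rw [List.drop_drop]; congr 1; omega
      have hdrop2 : items.drop (idx + tw.length + 1) = dw := by
        rw [← h1, hsplit]; exact List.drop_left
      -- membership facts
      have hpmem : p ∈ items := by rw [hp]; exact List.getElem_mem h
      have htw_mem : ∀ q ∈ tw, q ∈ items ∧ q.2 = p.2 := by
        intro q hq
        rw [htw] at hq
        constructor
        · exact List.Sublist.subset ((List.takeWhile_sublist _).trans (List.drop_sublist _ _)) hq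
        · simpa using List.mem_takeWhile_imp hq
      have hgroup_char : ∀ x ∈ p.1 :: tw.map (·.1), chAt x n = chAt p.1 n := by
        intro x hx
        rcases List.mem_cons.mp hx with rfl | hx
        · rfl
        · obtain ⟨q, hq, rfl⟩ := List.mem_map.mp hx
          obtain ⟨hqi, hqv⟩ := htw_mem q hq
          apply char_eq_of_toNat_eq
          have e1 := hvals q hqi
          have e2 := hvals p hpmem
          have e : ((chAt q.1 n).toNat : Int) = ((chAt p.1 n).toNat : Int) := by
            rw [← e1, ← e2, hqv]
          exact_mod_cast e
      -- the group of keys is duplicate-free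
      have hgroup_eq : p.1 :: tw.map (·.1) = ((items.drop idx).map (·.1)).take (tw.length + 1) := by
        rw [hdropidx, hsplit]
        simp
      have hgroup_nodup : (p.1 :: tw.map (·.1)).Nodup := by
        rw [hgroup_eq]
        refine List.Sublist.nodup ?_ hnd
        refine (List.take_sublist _ _).trans ?_
        rw [List.map_drop]
        exact List.drop_sublist _ _
      -- the sorted group, strictly increasing under pvKey
      have hcperm : (PySem.List.sorted (p.1 :: tw.map (·.1)) (fun x => x)).Perm (p.1 :: tw.map (·.1)) :=
        PySem.List.sorted_perm _ _ _
      have hcnodup : (PySem.List.sorted (p.1 :: tw.map (·.1)) (fun x => x)).Nodup :=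
        (hcperm.nodup_iff).mpr hgroup_nodup
      have hcle : (PySem.List.sorted (p.1 :: tw.map (·.1)) (fun x => x)).Pairwise (fun a b => a ≤ b) :=
        PySem.List.sorted_pairwise _ _
      have hcne : (PySem.List.sorted (p.1 :: tw.map (·.1)) (fun x => x)).Pairwise (fun a b => a ≠ b) :=
        hcnodup
      have hclt : (PySem.List.sorted (p.1 :: tw.map (·.1)) (fun x => x)).Pairwise (fun a b => a < b) :=
        (hcle.and hcne).imp (fun hab => lt_of_le_of_ne hab.1 hab.2)
      have hmemc : ∀ x ∈ PySem.List.sorted (p.1 :: tw.map (·.1)) (fun x => x), chAt x n = chAt p.1 n :=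
        fun x hx => hgroup_char x (hcperm.subset hx)
      have hcK : (PySem.List.sorted (p.1 :: tw.map (·.1)) (fun x => x)).Pairwise
          (fun a b => pvKey n a < pvKey n b) := by
        refine List.Pairwise.imp_of_mem ?_ hclt
        intro a b ha hb hab
        refine Prod.Lex.lt_iff.mpr (Or.inr ⟨?_, hab⟩)
        show chAt a n = chAt b n
        rw [hmemc a ha, hmemc b hb]
      -- every later item has a strictly larger value
      have hvdw : ∀ q ∈ dw, p.2 < q.2 := by
        intro q hq
        have hpwdrop : (items.drop idx).Pairwise (fun a b => a.2 ≤ b.2) :=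
          List.Pairwise.sublist (List.drop_sublist _ _) hpw
        rw [hdropidx, hsplit] at hpwdrop
        have hple : ∀ r ∈ tw ++ dw, p.2 ≤ r.2 := (List.pairwise_cons.mp hpwdrop).1
        cases hdwe : dw with
        | nil => rw [hdwe] at hq; simp at hq
        | cons q0 rest =>
          have hq0f : (q0.2 == p.2) = false :=
            dropWhile_head_false _ _ q0 rest (hdw.symm.trans hdwe)
          have hq0ne : q0.2 ≠ p.2 := by simpa using hq0f
          have hq0le : p.2 ≤ q0.2 := hple q0 (by rw [hdwe]; simp)
          have hq0lt : p.2 < q0.2 := lt_of_le_of_ne hq0le (Ne.symm hq0ne)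
          rw [hdwe] at hq
          rcases List.mem_cons.mp hq with rfl | hq
          · exact hq0lt
          · have hpwdw : dw.Pairwise (fun a b => a.2 ≤ b.2) := by
              rw [hdw]
              exact List.Pairwise.sublist (List.dropWhile_sublist _)
                (List.Pairwise.sublist (List.drop_sublist _ _) hpw)
            rw [hdwe] at hpwdw
            exact lt_of_lt_of_le hq0lt ((List.pairwise_cons.mp hpwdw).1 q hq)
      have hdw_mem : ∀ q ∈ dw, q ∈ items := by
        intro q hq
        rw [hdw] at hq
        exact List.Sublist.subset ((List.dropWhile_sublist _).trans (List.drop_sublist _ _)) hq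
      -- recursive call
      obtain ⟨r', heq', hperm', hpw'⟩ := ih items (idx + tw.length + 1)
        (answer ++ PySem.List.sorted (p.1 :: tw.map (·.1)) (fun x => x)) (by omega) hpw hvals hnd
      rw [hdrop2] at hperm'
      -- cross ordering between the group and the rest
      have hcross : ∀ a ∈ PySem.List.sorted (p.1 :: tw.map (·.1)) (fun x => x), ∀ b ∈ r',
          pvKey n a < pvKey n b := by
        intro a ha b hb
        obtain ⟨q, hq, rfl⟩ := List.mem_map.mp (hperm'.subset hb)
        have h1 : p.2 < q.2 := hvdw q hq
        have e2 := hvals p hpmem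
        have e3 := hvals q (hdw_mem q hq)
        have hchar : (chAt p.1 n).toNat < (chAt q.1 n).toNat := by
          rw [e2, e3] at h1; exact_mod_cast h1
        refine Prod.Lex.lt_iff.mpr (Or.inl ?_)
        show chAt a n < chAt q.1 n
        rw [hmemc a ha]
        exact char_lt_of_toNat_lt hchar
      refine ⟨PySem.List.sorted (p.1 :: tw.map (·.1)) (fun x => x) ++ r', ?_, ?_, ?_⟩
      · rw [outerA, dif_pos h]
        simp only [hidx, hinner]
        rw [heq', List.append_assoc]
      · rw [hdropidx, hsplit]
        simp only [List.map_cons, List.map_append]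
        exact hcperm.append hperm'
      · rw [List.pairwise_append]
        exact ⟨hcK, hpw', hcross⟩
    · have hnil : items.drop idx = [] := List.drop_eq_nil_of_le (by omega)
      refine ⟨[], ?_, ?_, ?_⟩
      · rw [outerA]; simp [h]
      · simp [hnil]
      · simp

-- ===== VERDICT (by name: the statement is the Claim_ definition above) =====
theorem solution_spec : Claim_equal_solution := by
  intro strings n _ hpre
  obtain ⟨hnd, hvalid⟩ := hpre
  unfold Spec_solution
  have hB : solution_alt strings n = PySem.List.sorted strings (pvKey n) := by
    unfold solution_alt
    rw [sorted2_eq_sorted_key, dedup_of_nodup strings hnd]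
  show outerA (PySem.List.sorted ((strings.foldl (fun d x => d.insert x (ordAt x n))
      (strings.foldl (fun d x => d.insert x 0) PySem.Dict.empty)).items) (fun p => p.2))
      strings.length 0 [] = solution_alt strings n
  rw [dic_items strings n hnd, hB]
  set ss := PySem.List.sorted (strings.map (fun x => (x, ordAt x n))) (fun p => p.2) with hss
  have hlen : strings.length = ss.length := by
    rw [hss, PySem.List.length_sorted, List.length_map]
  have hpw : ss.Pairwise (fun a b => a.2 ≤ b.2) := PySem.List.sorted_pairwise _ _
  have hvals : ∀ p ∈ ss, p.2 = ((chAt p.1 n).toNat : Int) := by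
    intro p hp
    rw [hss, PySem.List.mem_sorted] at hp
    obtain ⟨x, hx, rfl⟩ := List.mem_map.mp hp
    exact ordAt_eq x n (hvalid x hx)
  have hkeys : (ss.map (·.1)).Perm strings := by
    have h1 : ss.Perm (strings.map (fun x => (x, ordAt x n))) := PySem.List.sorted_perm _ _ _
    have h2 := h1.map (·.1)
    have h3 : (strings.map (fun x => (x, ordAt x n))).map (·.1) = strings := by
      conv_rhs => rw [← List.map_id strings]
      rw [List.map_map]
      apply List.map_congr_left
      intro x _
      rfl
    rw [h3] at h2
    exact h2
  have hnd' : (ss.map (·.1)).Nodup := (hkeys.nodup_iff).mpr hnd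
  obtain ⟨r, heq, hperm, hpwk⟩ := outer_spec n ss.length ss 0 [] (by omega) hpw hvals hnd'
  rw [hlen, heq]
  have hrperm : r.Perm strings := by
    rw [List.drop_zero] at hperm
    exact hperm.trans hkeys
  rw [PySem.List.sorted_eq_of_perm_of_pairwise_lt strings r (pvKey n) hrperm hpwk]
  simp

theorem solution_raises : Claim_raises_solution := by
  unfold Claim_raises_solution
  refine ⟨?_, by decide⟩
  intro strings n _ hr hp
  exact hr.1 hp.1

-- self-check that the raise-witness lies inside Raises_solution (projection of the claim above)
theorem pvRaiseWitness_solution_witness :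
    Raises_solution pvRaiseWitness_solution.1 pvRaiseWitness_solution.2 :=
  solution_raises.2.2.1
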